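-- pv_equiv track=rewrite | github.com/nancyyalilabufe/UTN-TUPaDProgramacion1 | Unidad 9/tp9.py | contar_digito
-- ===== SOURCE A (Python) =====
-- def contar_digito(numero, digito):
--     if numero == 0:
--         return 0
--     ultimo = numero % 10
--     resto = numero // 10
--     if ultimo == digito:
--         return 1 + contar_digito(resto, digito)
--     return contar_digito(resto, digito)
-- ===== SOURCE B (Python) =====
-- def contar_digito(numero, digito):
--     total = 0
--     while numero != 0:
--         if numero % 10 == digito:
--             total += 1
--         numero //= 10
--     return total
-- ===== Notes on version B (the rewrite author's own statement) =====
-- stated objective: idiomatic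
-- what changed: Replaces A's tail recursion by an explicit while-loop with a running counter (accumulator), avoiding recursion depth limits.
import Mathlib
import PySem

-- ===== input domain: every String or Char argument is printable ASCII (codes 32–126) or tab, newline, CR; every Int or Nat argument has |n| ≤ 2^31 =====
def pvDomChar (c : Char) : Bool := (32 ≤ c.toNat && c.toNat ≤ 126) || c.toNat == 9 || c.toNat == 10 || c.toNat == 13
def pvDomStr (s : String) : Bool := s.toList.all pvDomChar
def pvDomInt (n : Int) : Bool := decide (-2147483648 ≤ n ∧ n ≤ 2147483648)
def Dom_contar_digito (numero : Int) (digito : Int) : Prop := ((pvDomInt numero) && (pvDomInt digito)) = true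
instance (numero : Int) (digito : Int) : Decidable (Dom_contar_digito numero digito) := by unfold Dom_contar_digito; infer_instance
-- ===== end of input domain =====

-- B replaces A's tail recursion by an explicit while-loop with an accumulator (idiomatic; same cost).
-- Both versions loop forever on negative numero (A via RecursionError), so Pre_ requires 0 ≤ numero.

-- ===== PORT A =====
-- The 'numero < 0' branch is a totality guard only: Python A never returns there (RecursionError),
-- and Pre_ excludes those inputs.
def contar_digito (numero : Int) (digito : Int) : Int :=
  if numero = 0 then 0
  else if numero < 0 then 0
  else
    let ultimo := PySem.Int.mod numero 10
    let resto := PySem.Int.floordiv numero 10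
    if ultimo = digito then 1 + contar_digito resto digito
    else contar_digito resto digito
termination_by numero.toNat
decreasing_by
  all_goals
    rw [PySem.Int.floordiv_eq_ediv_of_pos (by norm_num : (0:Int) < 10)]
    omega

-- ===== PORT B =====
-- the while-loop of Source B, with (numero, total) as the loop state; same totality guard for numero < 0
def contarLoop (numero : Int) (digito : Int) (total : Int) : Int :=
  if numero = 0 then total
  else if numero < 0 then total
  else
    contarLoop (PySem.Int.floordiv numero 10) digito
      (if PySem.Int.mod numero 10 = digito then total + 1 else total)
termination_by numero.toNat
decreasing_by
  all_goals
    rw [PySem.Int.floordiv_eq_ediv_of_pos (by norm_num : (0:Int) < 10)]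
    omega

def contar_digito_alt (numero : Int) (digito : Int) : Int :=
  contarLoop numero digito 0

-- ===== PRECONDITION & SPEC =====
-- Pre_ excludes numero < 0, on which Python A raises RecursionError (and B does not terminate).
def Pre_contar_digito (numero : Int) (digito : Int) : Prop := 0 ≤ numero
instance (numero : Int) (digito : Int) : Decidable (Pre_contar_digito numero digito) := by
  unfold Pre_contar_digito; infer_instance

def pvWitness_contar_digito : Int × Int := (1203, 3)

def Spec_contar_digito (numero : Int) (digito : Int) (out : Int) : Prop := out = contar_digito_alt numero digito
instance (numero : Int) (digito : Int) (out : Int) : Decidable (Spec_contar_digito numero digito out) := by unfold Spec_contar_digito; infer_instance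

-- ===== CLAIM (what is proved, stated in full; the proofs are below) =====
def Claim_equal_contar_digito : Prop := ∀ (numero : Int) (digito : Int), Dom_contar_digito numero digito → Pre_contar_digito numero digito → Spec_contar_digito numero digito (contar_digito numero digito)

-- ===== LEMMAS AND PROOFS =====

-- loop invariant: the accumulator just adds up
lemma contarLoop_eq (digito : Int) :
    ∀ (n : Nat) (numero total : Int), numero.toNat = n →
      contarLoop numero digito total = total + contar_digito numero digito := by
  intro n
  induction n using Nat.strong_induction_on with
  | _ n ih =>
    intro numero total hn
    rw [contarLoop, contar_digito]
    by_cases h0 : numero = 0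
    · simp [h0]
    · by_cases hneg : numero < 0
      · simp [h0, hneg]
      · simp only [h0, hneg, if_false, if_true]
        have hlt : (PySem.Int.floordiv numero 10).toNat < n := by
          rw [PySem.Int.floordiv_eq_ediv_of_pos (by norm_num : (0:Int) < 10)]
          omega
        rw [ih _ hlt _ _ rfl]
        split_ifs <;> ring

-- ===== VERDICT (by name: the statement is the Claim_ definition above) =====
theorem contar_digito_spec : Claim_equal_contar_digito := by
  intro numero digito _ _
  unfold Spec_contar_digito contar_digito_alt
  rw [contarLoop_eq digito numero.toNat numero 0 rfl]
  ring
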